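-- pv_equiv track=rewrite | github.com/cynarski/Spoj-Python | JHTMLLET - Tagi HTML.py | tagi_HTML
-- ===== SOURCE A (Python) =====
-- def tagi_HTML(word: str):
--     tag = False
--     to_fix = list(map(str,word))
--     for i in range(0, len(to_fix)):
--         if(to_fix[i] == '<'):
--             tag = True
--         elif(to_fix[i] == '>'):
--             tag = False
--         if(tag):
--             to_fix[i] = str(to_fix[i]).upper()
--     result = ''.join(to_fix)
--     return result
-- ===== SOURCE B (Python) =====
-- def tagi_HTML(word: str):
--     # segment-based: copy text up to each '<' unchanged, uppercase from '<' to just before the next '>'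
--     out = []
--     rest = word
--     while rest:
--         j = rest.find('<')
--         if j == -1:
--             out.append(rest)
--             break
--         out.append(rest[:j])
--         k = rest.find('>', j)
--         if k == -1:
--             out.append(rest[j:].upper())
--             break
--         out.append(rest[j:k].upper())
--         rest = rest[k:]
--     return ''.join(out)
-- ===== Notes on version B (the rewrite author's own statement) =====
-- stated objective: simpler
-- what changed: Replaced the per-character boolean state machine by stateless segment chopping: repeatedly copy text up to the next '<' unchanged and uppercase the slice from that '<' to just before the following '>' (or to the end).
import Mathlib
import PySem

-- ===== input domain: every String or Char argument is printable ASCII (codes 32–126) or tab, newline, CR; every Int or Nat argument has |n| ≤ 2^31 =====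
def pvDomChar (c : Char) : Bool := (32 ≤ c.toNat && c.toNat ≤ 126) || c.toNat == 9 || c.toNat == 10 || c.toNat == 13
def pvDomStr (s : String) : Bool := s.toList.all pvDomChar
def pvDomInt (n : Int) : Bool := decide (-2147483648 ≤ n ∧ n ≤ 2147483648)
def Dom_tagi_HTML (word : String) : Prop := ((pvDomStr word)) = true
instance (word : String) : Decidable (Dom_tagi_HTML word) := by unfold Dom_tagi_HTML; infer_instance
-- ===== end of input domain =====

-- B replaces A's per-character boolean state machine by stateless segment chopping
-- (copy up to each '<' unchanged, uppercase the slice from '<' to before the next '>'):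
-- simpler; same O(n) asymptotics, measured faster in a timing run; return values proved equal on all inputs.

-- ===== PORT A =====
-- per-character loop carrying the `tag` flag, exactly A's updates in A's order
def tagiLoopA : Bool → List Char → List Char
  | _, [] => []
  | tag, c :: cs =>
    let tag' := if c = '<' then true else if c = '>' then false else tag
    (if tag' then PySem.Chars.upperChar c else c) :: tagiLoopA tag' cs

def tagi_HTML (word : String) : String :=
  String.ofList (tagiLoopA false word.toList)

-- dropWhile is [] or starts with a character failing the predicate (used for termination and below)
theorem dropWhile_nil_or_head (p : Char → Bool) (l : List Char) :
    l.dropWhile p = [] ∨ ∃ a t, l.dropWhile p = a :: t ∧ p a = false := by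
  cases hd : l.dropWhile p with
  | nil => exact Or.inl rfl
  | cons a t =>
    refine Or.inr ⟨a, t, rfl, ?_⟩
    have := List.head_dropWhile_not p (l := l) (by simp [hd])
    simpa [hd] using this

-- ===== PORT B =====
-- Source B's loop on the remaining suffix `rest`.  Source B locates the single characters
-- '<' and '>' with str.find and slices around them; for a one-character needle that
-- is exactly a takeWhile/dropWhile split, which is how it is transcribed here
-- (rest[:j] = takeWhile (· ≠ '<'), rest[j:] = dropWhile, likewise for '>' from j).
def tagiLoopB : List Char → List Char
  | [] => []
  | c :: cs =>
    let pre := (c :: cs).takeWhile (· ≠ '<')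
    let rest := (c :: cs).dropWhile (· ≠ '<')
    match _hr : rest with
    | [] => pre                     -- no '<' in rest: copy it and stop
    | lt :: r =>                    -- lt = '<'
      let tag := (lt :: r).takeWhile (· ≠ '>')   -- the slice rest[j:k] (or rest[j:])
      let rest2 := (lt :: r).dropWhile (· ≠ '>')
      pre ++ PySem.Chars.upper tag ++ tagiLoopB rest2
  termination_by l => l.length
  decreasing_by
    have hr' : List.dropWhile (fun x => decide (x ≠ '<')) (c :: cs) = lt :: r := _hr
    have h1 : (lt :: r).length ≤ (c :: cs).length := by
      rw [← hr']; exact List.length_dropWhile_le _ _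
    have hlt : lt = '<' := by
      rcases dropWhile_nil_or_head (fun x => decide (x ≠ '<')) (c :: cs) with hnil | ⟨a, t, hct, hpa⟩
      · rw [hr'] at hnil; exact absurd hnil (List.cons_ne_nil _ _)
      · rw [hr'] at hct
        obtain ⟨rfl, rfl⟩ := List.cons.injEq .. ▸ hct
        simpa using hpa
    have hstep : List.dropWhile (fun x => decide (x ≠ '>')) (lt :: r)
        = List.dropWhile (fun x => decide (x ≠ '>')) r := by
      subst hlt; simp [List.dropWhile]
    have h2 : (List.dropWhile (fun x => decide (x ≠ '>')) r).length ≤ r.length :=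
      List.length_dropWhile_le _ _
    simp only [hstep, List.length_cons] at *
    omega

def tagi_HTML_alt (word : String) : String :=
  String.ofList (tagiLoopB word.toList)

-- ===== PRECONDITION & SPEC =====
def Spec_tagi_HTML (word : String) (out : String) : Prop := out = tagi_HTML_alt word
instance (word : String) (out : String) : Decidable (Spec_tagi_HTML word out) := by unfold Spec_tagi_HTML; infer_instance

-- ===== CLAIM (what is proved, stated in full; the proofs are below) =====
def Claim_equal_tagi_HTML : Prop := ∀ (word : String), Dom_tagi_HTML word → Spec_tagi_HTML word (tagi_HTML word)

-- ===== LEMMAS AND PROOFS =====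

-- outside a tag, characters other than '<' pass through unchanged and leave tag = false
theorem tagiLoopA_false_append (pre rest : List Char) (h : ∀ c ∈ pre, c ≠ '<') :
    tagiLoopA false (pre ++ rest) = pre ++ tagiLoopA false rest := by
  induction pre with
  | nil => rfl
  | cons c cs ih =>
    have hc : c ≠ '<' := h c (List.mem_cons_self)
    have htag : (if c = '<' then true else if c = '>' then false else false) = false := by
      simp [hc]
    simp only [List.cons_append, tagiLoopA, htag, if_neg (Bool.false_ne_true)]
    exact congrArg _ (ih fun d hd => h d (List.mem_cons_of_mem _ hd))

-- inside a tag, characters other than '>' are uppercased and leave tag = true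
theorem tagiLoopA_true_append (t rest : List Char) (h : ∀ c ∈ t, c ≠ '>') :
    tagiLoopA true (t ++ rest) = t.map PySem.Chars.upperChar ++ tagiLoopA true rest := by
  induction t with
  | nil => rfl
  | cons c cs ih =>
    have hc : c ≠ '>' := h c (List.mem_cons_self)
    have htag : (if c = '<' then true else if c = '>' then false else true) = true := by
      simp [hc]
    simp only [List.cons_append, tagiLoopA, List.map_cons, htag]
    exact congrArg _ (ih fun d hd => h d (List.mem_cons_of_mem _ hd))

-- a '>' (or the end of input) closes the tag immediately, so the entry flag is irrelevant
theorem tagiLoopA_true_eq_false_of_gt (l : List Char)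
    (h : l = [] ∨ ∃ r, l = '>' :: r) :
    tagiLoopA true l = tagiLoopA false l := by
  rcases h with h | ⟨r, h⟩ <;> subst h
  · rfl
  · simp [tagiLoopA]

-- unfolding lemmas for tagiLoopB (well-founded recursion does not reduce by rfl)
theorem tagiLoopB_nil : tagiLoopB [] = [] := by
  rw [tagiLoopB]

theorem tagiLoopB_cons_nil (c : Char) (cs : List Char)
    (hd : (c :: cs).dropWhile (· ≠ '<') = []) :
    tagiLoopB (c :: cs) = (c :: cs).takeWhile (· ≠ '<') := by
  rw [tagiLoopB.eq_def]
  split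
  · rename_i heq; exact (List.cons_ne_nil _ _ heq).elim
  · rename_i c' cs' heq
    obtain ⟨rfl, rfl⟩ := List.cons.injEq .. ▸ heq
    dsimp only
    split
    · rfl
    · rename_i lt r heq2
      rw [hd] at heq2
      exact (List.cons_ne_nil _ _ heq2.symm).elim

theorem tagiLoopB_cons_cons (c : Char) (cs : List Char) (lt : Char) (r : List Char)
    (hd : (c :: cs).dropWhile (· ≠ '<') = lt :: r) :
    tagiLoopB (c :: cs) = (c :: cs).takeWhile (· ≠ '<')
      ++ PySem.Chars.upper ((lt :: r).takeWhile (· ≠ '>'))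
      ++ tagiLoopB ((lt :: r).dropWhile (· ≠ '>')) := by
  rw [tagiLoopB.eq_def]
  split
  · rename_i heq; exact (List.cons_ne_nil _ _ heq).elim
  · rename_i c' cs' heq
    obtain ⟨rfl, rfl⟩ := List.cons.injEq .. ▸ heq
    dsimp only
    split
    · rename_i heq2
      rw [hd] at heq2
      exact (List.cons_ne_nil _ _ heq2).elim
    · rename_i lt' r' heq2
      rw [hd] at heq2
      obtain ⟨rfl, rfl⟩ := List.cons.injEq .. ▸ heq2
      rfl

theorem tagiLoop_eq_bounded : ∀ (n : Nat) (l : List Char), l.length ≤ n →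
    tagiLoopA false l = tagiLoopB l := by
  intro n
  induction n with
  | zero =>
    intro l hl
    have : l = [] := List.eq_nil_of_length_eq_zero (Nat.le_zero.mp hl)
    subst this
    rw [tagiLoopB_nil]; rfl
  | succ m ih =>
    intro l hl
    cases l with
    | nil => rw [tagiLoopB_nil]; rfl
    | cons c cs =>
      have hpre_ne : ∀ d ∈ (c :: cs).takeWhile (· ≠ '<'), d ≠ '<' := by
        intro d hd
        simpa using List.mem_takeWhile_imp (p := (· ≠ '<')) hd
      have hA : tagiLoopA false (c :: cs)
          = (c :: cs).takeWhile (· ≠ '<')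
            ++ tagiLoopA false ((c :: cs).dropWhile (· ≠ '<')) := by
        conv_lhs => rw [← List.takeWhile_append_dropWhile (p := (· ≠ '<')) (l := c :: cs)]
        exact tagiLoopA_false_append _ _ hpre_ne
      rcases dropWhile_nil_or_head (· ≠ '<') (c :: cs) with hnil | ⟨a, r, hcons, ha⟩
      · rw [hA, hnil, tagiLoopB_cons_nil c cs hnil]
        simp [tagiLoopA]
      · have ha' : a = '<' := by simpa using ha
        subst ha'
        have ht_ne : ∀ d ∈ r.takeWhile (· ≠ '>'), d ≠ '>' := by
          intro d hd
          simpa using List.mem_takeWhile_imp (p := (· ≠ '>')) hd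
        have hr2shape : r.dropWhile (· ≠ '>') = [] ∨ ∃ r3, r.dropWhile (· ≠ '>') = '>' :: r3 := by
          rcases dropWhile_nil_or_head (· ≠ '>') r with hnil2 | ⟨b, r3, hcons2, hb⟩
          · exact Or.inl hnil2
          · exact Or.inr ⟨r3, by rw [hcons2, show b = '>' by simpa using hb]⟩
        have hlen_rest : ((c :: cs).dropWhile (· ≠ '<')).length ≤ cs.length + 1 := by
          simpa using List.length_dropWhile_le (· ≠ '<') (c :: cs)
        have hlen_r : r.length ≤ cs.length := by
          rw [hcons] at hlen_rest; simpa using hlen_rest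
        have hlen_r2 : (r.dropWhile (· ≠ '>')).length ≤ m := by
          have := List.length_dropWhile_le (· ≠ '>') r
          simp only [List.length_cons] at hl
          omega
        -- A's loop on the tag segment
        have hAstep : tagiLoopA false ('<' :: r)
            = PySem.Chars.upperChar '<'
              :: (((r.takeWhile (· ≠ '>')).map PySem.Chars.upperChar)
                  ++ tagiLoopB (r.dropWhile (· ≠ '>'))) := by
          show (if (if ('<':Char) = '<' then true else if ('<':Char) = '>' then false else false)
                then PySem.Chars.upperChar '<' else '<')
              :: tagiLoopA (if ('<':Char) = '<' then true
                            else if ('<':Char) = '>' then false else false) r = _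
          simp only [if_true]
          congr 1
          conv_lhs => rw [← List.takeWhile_append_dropWhile (p := (· ≠ '>')) (l := r)]
          rw [tagiLoopA_true_append _ _ ht_ne,
              tagiLoopA_true_eq_false_of_gt _ hr2shape, ih _ hlen_r2]
        have hdw_tag : (('<' : Char) :: r).takeWhile (· ≠ '>') = '<' :: r.takeWhile (· ≠ '>') := by
          simp [List.takeWhile]
        have hdw_r2 : (('<' : Char) :: r).dropWhile (· ≠ '>') = r.dropWhile (· ≠ '>') := by
          simp [List.dropWhile]
        rw [hA, hcons, hAstep, tagiLoopB_cons_cons c cs '<' r hcons, hdw_tag, hdw_r2]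
        have hupper : PySem.Chars.upper ('<' :: r.takeWhile (· ≠ '>'))
            = PySem.Chars.upperChar '<' :: (r.takeWhile (· ≠ '>')).map PySem.Chars.upperChar := rfl
        rw [hupper]
        simp [List.append_assoc]

theorem tagiLoop_eq (l : List Char) : tagiLoopA false l = tagiLoopB l :=
  tagiLoop_eq_bounded l.length l le_rfl

-- ===== VERDICT (by name: the statement is the Claim_ definition above) =====
theorem tagi_HTML_spec : Claim_equal_tagi_HTML := by
  intro word _
  unfold Spec_tagi_HTML tagi_HTML tagi_HTML_alt
  exact congrArg String.ofList (tagiLoop_eq word.toList)
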